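-- pv_equiv track=rewrite | github.com/dansam8/slither_bot | slither_bot.py | remove_food_on_sides
-- ===== SOURCE A (Python) =====
-- def remove_food_on_sides(ray_list, current_direction):
--     """sets food that is out of turning range to ignore value"""
--
--     ray_current_direction = int(current_direction / 360) * (len(ray_list) - 1)
--
--     food_remove_section = [int(ray_current_direction + len(ray_list) / 15), int(ray_current_direction - len(ray_list) / 15)]
--
--     if food_remove_section[1] < 0:
--         food_remove_section[1] += len(ray_list) - 1
--     if food_remove_section[0] > len(ray_list) - 1:
--         food_remove_section[0] += -(len(ray_list) - 1)
--
--     list_of_rays_to_change = []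
--
--     i = food_remove_section[0]
--
--     while True:
--         if i > len(ray_list) - 1:
--             i += -(len(ray_list))
--         if i == food_remove_section[1]:
--             break
--         list_of_rays_to_change.append(i)
--
--         i += 1
--
--     for i in range(10):
--         for j in list_of_rays_to_change:
--             if ray_list[j][i] == 2:
--                 ray_list[j][i] = 6
--         list_of_rays_to_change = list_of_rays_to_change[1:-1]
--
--     return ray_list
-- ===== SOURCE B (Python) =====
-- def remove_food_on_sides(ray_list, current_direction):
--     """sets food that is out of turning range to ignore value"""
--
--     n = len(ray_list)
--     ray_current_direction = int(current_direction / 360) * (n - 1)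
--
--     first = int(ray_current_direction + n / 15)
--     last = int(ray_current_direction - n / 15)
--     if last < 0:
--         last += n - 1
--     if first > n - 1:
--         first -= n - 1
--
--     # closed-form section: same ray indices A's wrap-around while-loop collects
--     length = last - first if first <= last else last - first + n
--     rays = [(first + k) % n for k in range(length)]
--
--     # row-major: each ray is touched in exactly the passes whose shrinking
--     # window still contains it, i.e. columns 0 .. min(p, length-1-p, 9)
--     for p, j in enumerate(rays):
--         for i in range(min(p, length - 1 - p, 9) + 1):
--             if ray_list[j][i] == 2:
--                 ray_list[j][i] = 6
--
--     return ray_list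
-- ===== Notes on version B (the rewrite author's own statement) =====
-- stated objective: alternative
-- what changed: B replaces A's wrap-around while-loop by a closed-form modular index list and replaces A's ten column-major passes over a repeatedly [1:-1]-sliced window list by one row-major sweep that computes each ray's column limit min(p, L-1-p, 9) directly, maintaining no shrinking list.
-- outside the precondition, e.g. on remove_food_on_sides([[2], [2], [2]], -400): A returns [[2], [2], [6]], B returns [[2], [2], [6]]; on remove_food_on_sides([[2], [2]], -816): A returns [[2], [2]], B returns [[2], [2]]
import Mathlib
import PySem

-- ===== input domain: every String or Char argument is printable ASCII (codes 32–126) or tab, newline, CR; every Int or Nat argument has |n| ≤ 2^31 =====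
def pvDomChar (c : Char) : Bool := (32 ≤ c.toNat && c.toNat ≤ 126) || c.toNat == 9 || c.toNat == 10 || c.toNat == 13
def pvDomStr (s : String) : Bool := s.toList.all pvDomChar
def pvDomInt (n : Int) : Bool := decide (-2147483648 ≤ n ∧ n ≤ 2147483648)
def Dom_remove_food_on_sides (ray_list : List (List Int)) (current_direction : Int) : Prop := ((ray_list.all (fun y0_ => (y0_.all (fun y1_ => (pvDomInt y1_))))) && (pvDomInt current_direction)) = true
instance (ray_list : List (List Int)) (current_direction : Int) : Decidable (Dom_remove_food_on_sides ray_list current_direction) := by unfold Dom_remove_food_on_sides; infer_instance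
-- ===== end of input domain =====

-- B rewrites A's wrap-around while-loop as a closed-form modular ray list and replaces the ten
-- column passes over a shrinking window by one row-major sweep; both mutate the same cells, the
-- equivalence proved is about the returned value (both Pythons mutate ray_list in place alike).

-- ===== PORT A =====
-- `ray_list[j][i] = 6 if ray_list[j][i] == 2` (shared by both ports; Python raises on an
-- out-of-range index — that case is excluded by Pre_, the port then leaves the list unchanged)
def pvSet6 (m : List (List Int)) (j i : Int) : List (List Int) :=
  match PySem.List.pyIdx? m.length j with
  | none => m
  | some jn =>
    let row := m.getD jn []
    match PySem.List.pyIdx? row.length i with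
    | none => m
    | some im => if row.getD im 0 = 2 then m.set jn (row.set im 6) else m

-- A's `while True` collector, fuelled (under Pre_ the break is reached within n+1 iterations)
def pvWhile (n : Nat) (f1 : Int) : Int → List Int → Nat → List Int
  | _, acc, 0 => acc
  | i, acc, fuel+1 =>
    let i' := if i > (n : Int) - 1 then i - n else i
    if i' = f1 then acc else pvWhile n f1 (i' + 1) (acc ++ [i']) fuel

-- int(current_direction / 360) and int(rcd ± n/15) are exact float computations on Dom
-- (|cd| ≤ 2^31), ported as truncating division Int.tdiv; int(rcd ± n/15) = (15*rcd ± n).tdiv 15.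
def remove_food_on_sides (ray_list : List (List Int)) (current_direction : Int) : List (List Int) :=
  let n : Int := ray_list.length
  let ray_current_direction := current_direction.tdiv 360 * (n - 1)
  let f0 := (15 * ray_current_direction + n).tdiv 15
  let f1 := (15 * ray_current_direction - n).tdiv 15
  let f1 := if f1 < 0 then f1 + (n - 1) else f1
  let f0 := if f0 > n - 1 then f0 - (n - 1) else f0
  let changes := pvWhile ray_list.length f1 f0 [] (ray_list.length + 1)
  ((PySem.List.pyRange 0 10 1).foldl
    (fun (st : List (List Int) × List Int) i =>
      (st.2.foldl (fun m j => pvSet6 m j i) st.1,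
       PySem.List.slice st.2 (some 1) (some (-1))))
    (ray_list, changes)).1

-- ===== PORT B =====
def remove_food_on_sides_alt (ray_list : List (List Int)) (current_direction : Int) : List (List Int) :=
  let n : Int := ray_list.length
  let ray_current_direction := current_direction.tdiv 360 * (n - 1)
  let first := (15 * ray_current_direction + n).tdiv 15
  let last := (15 * ray_current_direction - n).tdiv 15
  let last := if last < 0 then last + (n - 1) else last
  let first := if first > n - 1 then first - (n - 1) else first
  let length := if first ≤ last then last - first else last - first + n
  let rays := (PySem.List.pyRange 0 length 1).map (fun k => PySem.Int.mod (first + k) n)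
  (PySem.List.enumerate rays 0).foldl
    (fun m pj =>
      (PySem.List.pyRange 0 (min (min pj.1 (length - 1 - pj.1)) 9 + 1) 1).foldl
        (fun m' i => pvSet6 m' pj.2 i) m)
    ray_list

-- ===== PRECONDITION & SPEC =====
-- Pre_ excludes (a) inputs whose computed removal-section endpoints land outside [0, n-1] — there
-- A's wrap-around loop diverges or later indexing raises, except for a few accidental corners
-- where an (empty or negatively-indexed) section still returns — and (b) inputs where a touched
-- ray row is shorter than its pass window, on which A raises IndexError.
def Pre_remove_food_on_sides (ray_list : List (List Int)) (current_direction : Int) : Prop :=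
  let n : Int := ray_list.length
  let rcd := current_direction.tdiv 360 * (n - 1)
  let f0' := (15 * rcd + n).tdiv 15
  let f1' := (15 * rcd - n).tdiv 15
  let f1 := if f1' < 0 then f1' + (n - 1) else f1'
  let f0 := if f0' > n - 1 then f0' - (n - 1) else f0'
  let L := PySem.Int.mod (f1 - f0) n
  1 ≤ n ∧ 0 ≤ f0 ∧ f0 ≤ n - 1 ∧ 0 ≤ f1 ∧ f1 ≤ n - 1 ∧
    ∀ p < L.toNat,
      min (min ((p : Int)) (L - 1 - (p : Int))) 9 + 1 ≤
        ((ray_list.getD ((PySem.Int.mod (f0 + (p : Int)) n)).toNat []).length : Int)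
instance (ray_list : List (List Int)) (current_direction : Int) : Decidable (Pre_remove_food_on_sides ray_list current_direction) := by unfold Pre_remove_food_on_sides; infer_instance

def pvWitness_remove_food_on_sides : List (List Int) × Int :=
  ([[2, 2, 2, 2, 2, 2], [2, 2, 2, 2, 2, 2], [2, 2, 2, 2, 2, 2], [2, 2, 2, 2, 2, 2],
    [2, 2, 2, 2, 2, 2], [2, 2, 2, 2, 2, 2], [2, 2, 2, 2, 2, 2], [2, 2, 2, 2, 2, 2],
    [2, 2, 2, 2, 2, 2], [2, 2, 2, 2, 2, 2], [2, 2, 2, 2, 2, 2], [2, 2, 2, 2, 2, 2],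
    [2, 2, 2, 2, 2, 2], [2, 2, 2, 2, 2, 2], [2, 2, 2, 2, 2, 2]], 0)

def Spec_remove_food_on_sides (ray_list : List (List Int)) (current_direction : Int) (out : List (List Int)) : Prop := out = remove_food_on_sides_alt ray_list current_direction
instance (ray_list : List (List Int)) (current_direction : Int) (out : List (List Int)) : Decidable (Spec_remove_food_on_sides ray_list current_direction out) := by unfold Spec_remove_food_on_sides; infer_instance

-- ===== CLAIM (what is proved, stated in full; the proofs are below) =====
def Claim_equal_remove_food_on_sides : Prop := ∀ (ray_list : List (List Int)) (current_direction : Int), Dom_remove_food_on_sides ray_list current_direction → Pre_remove_food_on_sides ray_list current_direction → Spec_remove_food_on_sides ray_list current_direction (remove_food_on_sides ray_list current_direction)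

-- ===== LEMMAS AND PROOFS =====


def pvRowUpd (row : List Int) (i : Int) : List Int :=
  match PySem.List.pyIdx? row.length i with
  | none => row
  | some im => if row.getD im 0 = 2 then row.set im 6 else row

theorem pvIdx_lt {n : Nat} {j : Int} {k : Nat} (h : PySem.List.pyIdx? n j = some k) : k < n := by
  unfold PySem.List.pyIdx? at h
  split_ifs at h with h1 h2 h3 <;> simp_all <;> omega

theorem pv_getD_set_self {α : Type} [Inhabited α] (m : List α) (k : Nat) (r : α) (hk : k < m.length) (d : α) :
    (m.set k r).getD k d = r := by
  simp [List.getD_eq_getElem?_getD, hk]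

theorem pv_getD_set_ne {α : Type} (m : List α) (k k' : Nat) (r : α) (h : k ≠ k') (d : α) :
    (m.set k r).getD k' d = m.getD k' d := by
  simp [List.getD_eq_getElem?_getD, h]

theorem pv_set_getD_self {α : Type} (m : List α) (k : Nat) (hk : k < m.length) (d : α) :
    m.set k (m.getD k d) = m := by
  apply List.ext_getElem?
  intro t
  by_cases ht : t = k
  · subst ht
    simp [hk, List.getD_eq_getElem?_getD]
  · simp [Ne.symm ht]

theorem pvSet6_eq (m : List (List Int)) (j i : Int) :
    pvSet6 m j i = match PySem.List.pyIdx? m.length j with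
      | none => m
      | some jn => m.set jn (pvRowUpd (m.getD jn []) i) := by
  unfold pvSet6 pvRowUpd
  cases h : PySem.List.pyIdx? m.length j with
  | none => rfl
  | some jn =>
    simp only
    cases h2 : PySem.List.pyIdx? (m.getD jn []).length i with
    | none => exact (pv_set_getD_self m jn (pvIdx_lt h) []).symm
    | some im =>
      simp only
      split_ifs with hc
      · rfl
      · exact (pv_set_getD_self m jn (pvIdx_lt h) []).symm

theorem pvRowUpd_length (row : List Int) (i : Int) : (pvRowUpd row i).length = row.length := by
  unfold pvRowUpd
  cases h : PySem.List.pyIdx? row.length i <;> simp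
  split_ifs <;> simp

theorem pvSet6_length (m : List (List Int)) (j i : Int) : (pvSet6 m j i).length = m.length := by
  rw [pvSet6_eq]
  cases h : PySem.List.pyIdx? m.length j <;> simp

theorem pvRowUpd_comm (row : List Int) (i1 i2 : Int) :
    pvRowUpd (pvRowUpd row i1) i2 = pvRowUpd (pvRowUpd row i2) i1 := by
  have hres : ∀ (r : List Int) (i : Int), PySem.List.pyIdx? (pvRowUpd r i).length = PySem.List.pyIdx? r.length := by
    intro r i; rw [pvRowUpd_length]
  cases h1 : PySem.List.pyIdx? row.length i1 with
  | none =>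
    have e1 : pvRowUpd row i1 = row := by unfold pvRowUpd; rw [h1]
    rw [e1]
    conv_rhs => rw [pvRowUpd]
    rw [hres, h1]
  | some im1 =>
    cases h2 : PySem.List.pyIdx? row.length i2 with
    | none =>
      have e2 : pvRowUpd row i2 = row := by unfold pvRowUpd; rw [h2]
      rw [e2]
      conv_lhs => rw [pvRowUpd]
      rw [hres, h2]
    | some im2 =>
      have him1 : im1 < row.length := pvIdx_lt h1
      have him2 : im2 < row.length := pvIdx_lt h2
      have e1 : pvRowUpd row i1 = if row.getD im1 0 = 2 then row.set im1 6 else row := by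
        unfold pvRowUpd; rw [h1]
      have e2 : pvRowUpd row i2 = if row.getD im2 0 = 2 then row.set im2 6 else row := by
        unfold pvRowUpd; rw [h2]
      have eL : pvRowUpd (pvRowUpd row i1) i2 =
          if (pvRowUpd row i1).getD im2 0 = 2 then (pvRowUpd row i1).set im2 6 else pvRowUpd row i1 := by
        conv_lhs => rw [pvRowUpd]
        rw [hres, h2]
      have eR : pvRowUpd (pvRowUpd row i2) i1 =
          if (pvRowUpd row i2).getD im1 0 = 2 then (pvRowUpd row i2).set im1 6 else pvRowUpd row i2 := by
        conv_lhs => rw [pvRowUpd]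
        rw [hres, h1]
      rw [eL, eR, e1, e2]
      by_cases heq : im1 = im2
      · subst heq
        by_cases hc : row.getD im1 0 = 2 <;>
          simp_all [List.getD_eq_getElem?_getD]
      · by_cases hc1 : row.getD im1 0 = 2 <;> by_cases hc2 : row.getD im2 0 = 2 <;>
          simp_all [List.getD_eq_getElem?_getD, Ne.symm heq, List.set_comm _ _ heq]

theorem pvSet6_comm (m : List (List Int)) (a b : Int × Int) :
    pvSet6 (pvSet6 m a.1 a.2) b.1 b.2 = pvSet6 (pvSet6 m b.1 b.2) a.1 a.2 := by
  obtain ⟨j1, i1⟩ := a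
  obtain ⟨j2, i2⟩ := b
  simp only
  cases h1 : PySem.List.pyIdx? m.length j1 with
  | none =>
    have e1 : ∀ m' : List (List Int), m'.length = m.length → pvSet6 m' j1 i1 = m' := by
      intro m' hm; rw [pvSet6_eq, hm, h1]
    rw [e1 m rfl, e1 _ (pvSet6_length m j2 i2)]
  | some k1 =>
    cases h2 : PySem.List.pyIdx? m.length j2 with
    | none =>
      have e2 : ∀ m' : List (List Int), m'.length = m.length → pvSet6 m' j2 i2 = m' := by
        intro m' hm; rw [pvSet6_eq, hm, h2]
      rw [e2 m rfl, e2 _ (pvSet6_length m j1 i1)]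
    | some k2 =>
      have E : ∀ (m' : List (List Int)), m'.length = m.length → ∀ (j i : Int) (k : Nat),
          PySem.List.pyIdx? m.length j = some k →
          pvSet6 m' j i = m'.set k (pvRowUpd (m'.getD k []) i) := by
        intro m' hm j i k hk; rw [pvSet6_eq, hm, hk]
      rw [E m rfl j1 i1 k1 h1, E _ (by rw [List.length_set]) j2 i2 k2 h2,
          E m rfl j2 i2 k2 h2, E _ (by rw [List.length_set]) j1 i1 k1 h1]
      by_cases hkk : k1 = k2
      · subst hkk
        have hk1 : k1 < m.length := pvIdx_lt h1
        rw [pv_getD_set_self _ _ _ hk1, pv_getD_set_self _ _ _ hk1, List.set_set, List.set_set,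
          pvRowUpd_comm]
      · rw [pv_getD_set_ne _ _ _ _ hkk, pv_getD_set_ne _ _ _ _ (Ne.symm hkk),
          List.set_comm _ _ hkk]

theorem pvWhile_eq (n : Nat) (f1 : Int) (h1 : 0 ≤ f1) (h2 : f1 ≤ (n : Int) - 1) :
    ∀ (d : Nat) (i : Int) (acc : List Int) (fuel : Nat), 0 ≤ i → i ≤ (n : Int) →
      ((f1 - i) % (n:Int)).toNat = d → d + 1 ≤ fuel →
      pvWhile n f1 i acc fuel =
        acc ++ (List.range d).map (fun (k : Nat) => (i + (k : Int)) % (n:Int)) := by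
  have hn : 1 ≤ (n : Int) := by omega
  have hsub : ∀ a b : Int, (a - (b - n)) % (n:Int) = (a - b) % (n:Int) := by
    intro a b
    have h : a - (b - n) = (a - b) + (n : Int) * 1 := by ring
    rw [h, Int.add_mul_emod_self_left]
  have hadd : ∀ a b : Int, ((a - n) + b) % (n:Int) = (a + b) % (n:Int) := by
    intro a b
    have h : (a - n) + b = (a + b) + (n : Int) * (-1) := by ring
    rw [h, Int.add_mul_emod_self_left]
  intro d
  induction d with
  | zero =>
    intro i acc fuel hi0 hin hd hfuel
    obtain ⟨fuel, rfl⟩ : ∃ f, fuel = f + 1 := ⟨fuel - 1, by omega⟩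
    have hnn := Int.emod_nonneg (f1 - i) (by omega : (n : Int) ≠ 0)
    have hmod : (f1 - i) % (n:Int) = 0 := by omega
    set i' := if i > (n : Int) - 1 then i - n else i with hi'
    have hb : 0 ≤ i' ∧ i' ≤ (n : Int) - 1 := by
      by_cases h : i > (n : Int) - 1 <;> simp [hi', h] <;> omega
    have hmod' : (f1 - i') % (n:Int) = 0 := by
      by_cases h : i > (n : Int) - 1
      · simp only [hi', if_pos h]; rw [hsub]; exact hmod
      · simpa [hi', h] using hmod
    have hieq : i' = f1 := by
      rcases Int.lt_or_le (f1 - i') 0 with hlt | hge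
      · exfalso
        have hx : (f1 - i') % (n:Int) = (f1 - i') + n := by
          have hy : f1 - i' = ((f1 - i') + n) + (n : Int) * (-1) := by ring
          rw [hy, Int.add_mul_emod_self_left, Int.emod_eq_of_lt (by omega) (by omega)]
          omega
        omega
      · have hx : (f1 - i') % (n:Int) = f1 - i' := Int.emod_eq_of_lt hge (by omega)
        omega
    rw [pvWhile]
    simp only [← hi']
    rw [if_pos hieq]
    simp
  | succ d ih =>
    intro i acc fuel hi0 hin hd hfuel
    obtain ⟨fuel, rfl⟩ : ∃ f, fuel = f + 1 := ⟨fuel - 1, by omega⟩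
    set i' := if i > (n : Int) - 1 then i - n else i with hi'
    have hb : 0 ≤ i' ∧ i' ≤ (n : Int) - 1 := by
      by_cases h : i > (n : Int) - 1 <;> simp [hi', h] <;> omega
    have hcong : (f1 - i') % (n:Int) = (f1 - i) % (n:Int) := by
      by_cases h : i > (n : Int) - 1
      · simp only [hi', if_pos h]; rw [hsub]
      · simp [hi', h]
    have hnn := Int.emod_nonneg (f1 - i) (by omega : (n : Int) ≠ 0)
    have hmodval : (f1 - i') % (n:Int) = (d : Int) + 1 := by rw [hcong]; omega
    have hne : i' ≠ f1 := by
      intro he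
      rw [he, sub_self] at hmodval
      simp at hmodval
      omega
    have hdn : (d : Int) + 1 < n := by
      have := Int.emod_lt_of_pos (f1 - i') (by omega : (0:Int) < n)
      omega
    rw [pvWhile]
    simp only [← hi']
    rw [if_neg hne]
    have hnext : ((f1 - (i' + 1)) % (n:Int)).toNat = d := by
      have hq := Int.mul_ediv_add_emod (f1 - i') (n : Int)
      have hx : f1 - (i' + 1) = (d : Int) + (n : Int) * ((f1 - i') / (n:Int)) := by
        omega
      rw [hx, Int.add_mul_emod_self_left, Int.emod_eq_of_lt (by omega) (by omega)]
      omega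
    rw [ih (i' + 1) (acc ++ [i']) fuel (by omega) (by omega) hnext (by omega)]
    have hmodi : ∀ k : Int, (i + k) % (n:Int) = (i' + k) % (n:Int) := by
      intro k
      by_cases h : i > (n : Int) - 1
      · simp only [hi', if_pos h]; rw [hadd]
      · simp [hi', h]
    have hhead : (i + (0 : Int)) % (n:Int) = i' := by
      rw [hmodi 0, add_zero]
      exact Int.emod_eq_of_lt hb.1 (by omega)
    have hlist : (List.range (d+1)).map (fun (k : Nat) => (i + (k : Int)) % (n:Int)) =
        i' :: (List.range d).map (fun (k : Nat) => (i' + 1 + (k : Int)) % (n:Int)) := by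
      have htail : (List.range d).map ((fun (k : Nat) => (i + (k : Int)) % (n:Int)) ∘ Nat.succ) =
          (List.range d).map (fun (k : Nat) => (i' + 1 + (k : Int)) % (n:Int)) := by
        apply List.map_congr_left
        intro k _
        simp only [Function.comp_apply]
        have hc : ((Nat.succ k : Nat) : Int) = (k : Int) + 1 := by push_cast; ring
        rw [hc, hmodi ((k : Int) + 1)]
        congr 1
        ring
      rw [List.range_succ_eq_map, List.map_cons, List.map_map, htail]
      congr 1
    rw [hlist]
    simp

def pvG (m : List (List Int)) (c : Int × Int) : List (List Int) := pvSet6 m c.1 c.2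

def pvW (c : List Int) (a b : Nat) : List Int := (c.take b).drop a

def pvWin (c : List Int) : Nat → List Int
  | 0 => c
  | k + 1 => PySem.List.slice (pvWin c k) (some 1) (some (-1))

def pvCellsA (c : List Int) (K : Nat) : List (Int × Int) :=
  (List.range K).flatMap (fun k => (pvWin c k).map (fun j => (j, (k : Int))))

def pvCellsB (c : List Int) (K : Nat) : List (Int × Int) :=
  c.zipIdx.flatMap (fun jp =>
    (List.range (min (min (jp.2 + 1) (c.length - jp.2)) K)).map (fun (iN : Nat) => (jp.1, (iN : Int))))

theorem pvW_slice (c : List Int) (a b : Nat) (hb : b ≤ c.length) :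
    PySem.List.slice (pvW c a b) (some 1) (some (-1)) = pvW c (a + 1) (b - 1) := by
  apply List.ext_getElem?
  intro t
  simp only [pvW, PySem.List.slice, PySem.List.clampIdx]
  norm_num
  simp [List.getElem?_take, List.getElem?_drop, Nat.min_def]
  split_ifs <;> first
    | rfl
    | (congr 1; omega)

theorem pvWin_eq (c : List Int) (k : Nat) : pvWin c k = pvW c k (c.length - k) := by
  induction k with
  | zero => simp [pvWin, pvW]
  | succ k ih =>
    rw [pvWin, ih, pvW_slice c k _ (by omega)]
    congr 1

theorem pvFoldl_flatMap {α β : Type} (l : List α) (h : α → List (Int × Int))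
    (g : β → (Int × Int) → β) (s : β) :
    (l.flatMap h).foldl g s = l.foldl (fun s x => (h x).foldl g s) s := by
  induction l generalizing s with
  | nil => rfl
  | cons x xs ih => simp [List.flatMap_cons, List.foldl_append, ih]

theorem pvCellsA_succ (c : List Int) (K : Nat) :
    pvCellsA c (K + 1) = pvCellsA c K ++ (pvWin c K).map (fun j => (j, (K : Int))) := by
  rw [pvCellsA, pvCellsA, List.range_succ]
  simp

theorem pvPasses_eq (c : List Int) (m : List (List Int)) (K : Nat) :
    ((List.range K).foldl
      (fun (st : List (List Int) × List Int) (k : Nat) =>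
        (st.2.foldl (fun m' j => pvSet6 m' j (k : Int)) st.1,
         PySem.List.slice st.2 (some 1) (some (-1))))
      (m, c)) = ((pvCellsA c K).foldl pvG m, pvWin c K) := by
  induction K with
  | zero => simp [pvCellsA, pvWin]
  | succ K ih =>
    rw [List.range_succ, List.foldl_append, ih]
    simp only [List.foldl_cons, List.foldl_nil]
    rw [pvCellsA_succ, List.foldl_append, List.foldl_map]
    rfl

theorem pvCore {α β : Type} (f : α → β) :
    ∀ (c : List α) (s a b : Nat),
      (c.zipIdx s).flatMap (fun xp => if a ≤ xp.2 ∧ xp.2 < b then [f xp.1] else []) =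
        ((c.take (b - s)).drop (a - s)).map f := by
  intro c
  induction c with
  | nil => intro s a b; simp
  | cons x c ih =>
    intro s a b
    rw [List.zipIdx_cons, List.flatMap_cons, ih (s + 1) a b]
    by_cases hsb : s < b
    · have hb' : b - s = (b - s - 1) + 1 := by omega
      rw [hb', List.take_succ_cons]
      by_cases has : a ≤ s
      · have ha0 : a - s = 0 := by omega
        have ha1 : a - (s + 1) = 0 := by omega
        have h3 : b - (s + 1) = b - s - 1 := by omega
        rw [ha0, ha1, h3, List.drop_zero, List.drop_zero, List.map_cons]
        simp [has, hsb]
      · have ha : a - s = (a - s - 1) + 1 := by omega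
        have h2 : a - (s + 1) = a - s - 1 := by omega
        have h3 : b - (s + 1) = b - s - 1 := by omega
        rw [ha, List.drop_succ_cons, h2, h3]
        simp [has]
    · have hb0 : b - s = 0 := by omega
      have hb1 : b - (s + 1) = 0 := by omega
      rw [hb0, hb1]
      simp [hsb]

theorem pvRange_min_succ (t K : Nat) (f : Nat → Int × Int) :
    (List.range (min t (K + 1))).map f =
      (List.range (min t K)).map f ++ (if K < t then [f K] else []) := by
  by_cases h : K < t
  · have h1 : min t (K + 1) = K + 1 := by omega
    have h2 : min t K = K := by omega
    rw [h1, h2, List.range_succ, if_pos h]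
    simp
  · have h1 : min t (K + 1) = min t K := by omega
    rw [h1, if_neg h]
    simp

theorem pvPerm (c : List Int) (K : Nat) : (pvCellsA c K).Perm (pvCellsB c K) := by
  induction K with
  | zero =>
    simp [pvCellsA, pvCellsB]
  | succ K ih =>
    have hsplit : pvCellsB c (K + 1) =
        c.zipIdx.flatMap (fun jp =>
          ((List.range (min (min (jp.2 + 1) (c.length - jp.2)) K)).map (fun (iN : Nat) => (jp.1, (iN : Int)))) ++
          (if K ≤ jp.2 ∧ jp.2 < c.length - K then [(jp.1, (K : Int))] else [])) := by
      rw [pvCellsB]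
      congr 1
      funext jp
      rw [pvRange_min_succ]
      congr 1
      by_cases h : K < min (jp.2 + 1) (c.length - jp.2) <;>
        [rw [if_pos h, if_pos (by omega)]; rw [if_neg h, if_neg (by omega)]]
    have hextra : c.zipIdx.flatMap
        (fun jp => (if K ≤ jp.2 ∧ jp.2 < c.length - K then [(jp.1, (K : Int))] else [])) =
        (pvWin c K).map (fun j => (j, (K : Int))) := by
      have := pvCore (fun j => (j, (K : Int))) c 0 K (c.length - K)
      simp only [Nat.sub_zero] at this
      rw [this, pvWin_eq]
      rfl
    rw [pvCellsA_succ, hsplit]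
    refine ((ih.append (List.Perm.refl _)).trans ?_)
    rw [← hextra]
    exact List.flatMap_append_perm c.zipIdx _ _

theorem pvFoldl_congr {α β : Type} (l : List α) (f g : β → α → β) (b : β)
    (h : ∀ x ∈ l, ∀ acc, f acc x = g acc x) : l.foldl f b = l.foldl g b := by
  exact PySem.List.foldl_congr_mem l f g b (fun acc x hx => h x hx acc)

theorem pvMain (rl : List (List Int)) (f0 f1 : Int)
    (h00 : 0 ≤ f0) (h01 : f0 ≤ (rl.length : Int) - 1)
    (h10 : 0 ≤ f1) (h11 : f1 ≤ (rl.length : Int) - 1) :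
    (List.foldl (fun (st : List (List Int) × List Int) i =>
        (List.foldl (fun m j => pvSet6 m j i) st.1 st.2, PySem.List.slice st.2 (some 1) (some (-1))))
      (rl, pvWhile rl.length f1 f0 [] (rl.length + 1)) (PySem.List.pyRange 0 10)).1 =
    List.foldl (fun m pj =>
        List.foldl (fun m' i => pvSet6 m' pj.2 i) m
          (PySem.List.pyRange 0
            (min (min pj.1 ((if f0 ≤ f1 then f1 - f0 else f1 - f0 + (rl.length : Int)) - 1 - pj.1)) 9 + 1)))
      rl
      (PySem.List.enumerate
        ((PySem.List.pyRange 0 (if f0 ≤ f1 then f1 - f0 else f1 - f0 + (rl.length : Int))).map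
          (fun k => PySem.Int.mod (f0 + k) (rl.length : Int))) 0) := by
  have hn : 1 ≤ (rl.length : Int) := by omega
  set N := rl.length with hN
  set L : Int := (f1 - f0) % (N : Int) with hL
  have hL0 : 0 ≤ L := Int.emod_nonneg _ (by omega)
  have hLlt : L < (N : Int) := Int.emod_lt_of_pos _ (by omega)
  set d := L.toNat with hd
  have hLd : L = (d : Int) := by omega
  have hchanges : pvWhile N f1 f0 [] (N + 1) =
      (List.range d).map (fun (k : Nat) => (f0 + (k : Int)) % (N : Int)) := by
    have := pvWhile_eq N f1 h10 h11 d f0 [] (N + 1) h00 (by omega) (by rw [← hL, hd]) (by omega)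
    simpa using this
  set c := (List.range d).map (fun (k : Nat) => (f0 + (k : Int)) % (N : Int)) with hc
  have hclen : c.length = d := by rw [hc]; simp
  -- the removal-section length computed by B is L
  have hlen : (if f0 ≤ f1 then f1 - f0 else f1 - f0 + (N : Int)) = L := by
    by_cases hcmp : f0 ≤ f1
    · rw [if_pos hcmp, hL, Int.emod_eq_of_lt (by omega) (by omega)]
    · rw [if_neg hcmp, hL]
      have hx : f1 - f0 = (f1 - f0 + N) + (N : Int) * (-1) := by ring
      rw [hx, Int.add_mul_emod_self_left, Int.emod_eq_of_lt (by omega) (by omega)]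
      ring
  -- A's side is a fold of pvG over pvCellsA
  have hA : (List.foldl (fun (st : List (List Int) × List Int) i =>
        (List.foldl (fun m j => pvSet6 m j i) st.1 st.2, PySem.List.slice st.2 (some 1) (some (-1))))
      (rl, pvWhile N f1 f0 [] (N + 1)) (PySem.List.pyRange 0 10)).1 =
      (pvCellsA c 10).foldl pvG rl := by
    rw [hchanges, PySem.List.pyRange_one]
    norm_num
    rw [List.foldl_map, show Int.toNat 10 = 10 from rfl]
    rw [pvPasses_eq c rl 10]
  rw [hA, hlen, hLd]
  -- B's rays list is c
  have hrays : (PySem.List.pyRange 0 ((d : Int))).map (fun k => PySem.Int.mod (f0 + k) (N : Int)) = c := by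
    rw [PySem.List.pyRange_one, List.map_map, hc]
    apply List.map_congr_left
    intro k _
    simp only [Function.comp_apply, zero_add]
    rw [PySem.Int.mod_eq_emod_of_pos (by omega)]
  rw [hrays, PySem.List.enumerate_eq_zipIdx_map, List.foldl_map]
  -- B's side is a fold of pvG over pvCellsB
  have hB : (pvCellsB c 10).foldl pvG rl =
      List.foldl (fun m (p : Int × Nat) =>
        List.foldl (fun m' i => pvSet6 m' p.1 i) m
          (PySem.List.pyRange 0 (min (min ((0 : Int) + (p.2 : Int)) ((d : Int) - 1 - ((0 : Int) + (p.2 : Int)))) 9 + 1)))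
        rl c.zipIdx := by
    rw [pvCellsB, pvFoldl_flatMap]
    apply pvFoldl_congr
    intro jp hjp acc
    obtain ⟨-, hlt, -⟩ := List.mem_zipIdx hjp
    rw [List.foldl_map, PySem.List.pyRange_one, List.foldl_map]
    have hcnt : ((min (min ((0 : Int) + (jp.2 : Int)) ((d : Int) - 1 - ((0 : Int) + (jp.2 : Int)))) 9 + 1) - 0).toNat
        = min (min (jp.2 + 1) (c.length - jp.2)) 10 := by
      rw [hclen]
      omega
    rw [hcnt]
    apply pvFoldl_congr
    intro x _ acc'
    simp [pvG]
  rw [← hB]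
  letI : RightCommutative pvG := ⟨fun m a b => pvSet6_comm m a b⟩
  exact (pvPerm c 10).foldl_eq rl

-- ===== VERDICT (by name: the statement is the Claim_ definition above) =====
theorem remove_food_on_sides_spec : Claim_equal_remove_food_on_sides := by
  intro rl cd _ hpre
  unfold Spec_remove_food_on_sides
  simp only [remove_food_on_sides, remove_food_on_sides_alt]
  simp only [Pre_remove_food_on_sides] at hpre
  obtain ⟨hn1, h00, h01, h10, h11, -⟩ := hpre
  exact pvMain rl _ _ h00 h01 h10 h11
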